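-- pv_equiv track=rewrite | github.com/NohamR/pixeldrain-py | pixeldrain.py | parse_file_id
-- ===== SOURCE A (Python) =====
-- def parse_file_id(input_str: str) -> str:
--     """Extract file ID from pixeldrain URL or return as-is if already an ID."""
--     # Handle various pixeldrain URL formats
--     input_str = input_str.strip()
--     if "pixeldrain.com/u/" in input_str:
--         return input_str.split("pixeldrain.com/u/")[-1]
--     if "pixeldrain.com/f/" in input_str:
--         return input_str.split("pixeldrain.com/f/")[-1]
--     if "href.li/?" in input_str:
--         return parse_file_id(input_str.split("href.li/?")[-1])
--     return input_str
-- ===== SOURCE B (Python) =====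
-- def parse_file_id(input_str: str) -> str:
--     """Extract file ID from pixeldrain URL or return as-is if already an ID."""
--     # Non-recursive: the tail of an href.li split can contain no further
--     # "href.li/?", so at most one unwrap step is ever needed.
--     s = input_str.strip()
--     if "href.li/?" in s and "pixeldrain.com/u/" not in s and "pixeldrain.com/f/" not in s:
--         s = s.split("href.li/?")[-1].strip()
--     for pat in ("pixeldrain.com/u/", "pixeldrain.com/f/"):
--         if pat in s:
--             return s.split(pat)[-1]
--     return s
-- ===== Notes on version B (the rewrite author's own statement) =====
-- stated objective: alternative
-- what changed: Replaces A's recursive href.li unwrapping with a straight-line, non-recursive version: since the last piece of an href.li/? split can never contain href.li/? again, B unwraps at most once (guarded by a combined condition) and then scans the two pixeldrain patterns in a single loop.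
import Mathlib
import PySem

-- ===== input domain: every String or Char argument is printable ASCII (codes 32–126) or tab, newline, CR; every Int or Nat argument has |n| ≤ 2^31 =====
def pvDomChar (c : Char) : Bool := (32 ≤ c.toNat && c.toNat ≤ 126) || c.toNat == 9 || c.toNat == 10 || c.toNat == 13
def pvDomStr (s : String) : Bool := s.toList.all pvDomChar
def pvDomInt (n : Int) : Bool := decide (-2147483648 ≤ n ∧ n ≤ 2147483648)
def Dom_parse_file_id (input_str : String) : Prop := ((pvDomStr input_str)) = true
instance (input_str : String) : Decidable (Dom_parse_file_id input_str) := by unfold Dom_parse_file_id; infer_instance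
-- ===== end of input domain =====

-- B replaces A's recursive href.li unwrapping by a straight-line version (at most one unwrap,
-- justified by the proof that an href.li split tail contains no further "href.li/?"); return values agree on all inputs.


-- ===== PORT A =====
-- the three pattern literals, shared by both ports
def pvU : List Char := "pixeldrain.com/u/".toList
def pvF : List Char := "pixeldrain.com/f/".toList
def pvH : List Char := "href.li/?".toList

-- A's recursion, fuel = length + 1 (a totality guard only; the fuel-0 arm is never reached
-- because each href.li step strictly shrinks the string).
-- s.split(sep)[-1] is ported as pyGetD … (-1) [] — exact since splitOn is never empty.
def parse_file_id_go (fuel : Nat) (s : List Char) : List Char :=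
  match fuel with
  | 0 => s
  | fuel + 1 =>
    let s1 := PySem.Chars.strip s
    if PySem.Chars.isIn pvU s1 then PySem.List.pyGetD (PySem.Chars.splitOn s1 pvU) (-1) []
    else if PySem.Chars.isIn pvF s1 then PySem.List.pyGetD (PySem.Chars.splitOn s1 pvF) (-1) []
    else if PySem.Chars.isIn pvH s1 then
      parse_file_id_go fuel (PySem.List.pyGetD (PySem.Chars.splitOn s1 pvH) (-1) [])
    else s1

def parse_file_id (input_str : String) : String :=
  String.mk (parse_file_id_go (input_str.toList.length + 1) input_str.toList)

-- ===== PORT B =====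
def parse_file_id_alt_core (s : List Char) : List Char :=
  let s1 := PySem.Chars.strip s
  let s2 := if PySem.Chars.isIn pvH s1 && !PySem.Chars.isIn pvU s1 && !PySem.Chars.isIn pvF s1 then
              PySem.Chars.strip (PySem.List.pyGetD (PySem.Chars.splitOn s1 pvH) (-1) [])
            else s1
  match [pvU, pvF].find? (fun p => PySem.Chars.isIn p s2) with
  | some p => PySem.List.pyGetD (PySem.Chars.splitOn s2 p) (-1) []
  | none => s2

def parse_file_id_alt (input_str : String) : String :=
  String.mk (parse_file_id_alt_core input_str.toList)

-- ===== PRECONDITION & SPEC =====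
def Spec_parse_file_id (input_str : String) (out : String) : Prop := out = parse_file_id_alt input_str
instance (input_str : String) (out : String) : Decidable (Spec_parse_file_id input_str out) := by unfold Spec_parse_file_id; infer_instance

-- ===== CLAIM (what is proved, stated in full; the proofs are below) =====
def Claim_equal_parse_file_id : Prop := ∀ (input_str : String), Dom_parse_file_id input_str → Spec_parse_file_id input_str (parse_file_id input_str)

-- ===== LEMMAS AND PROOFS =====

theorem splitOn_go_ne_nil (sep : List Char) (fuel : Nat) (l cur : List Char)
    (acc : List (List Char)) : PySem.Chars.splitOn.go sep fuel l cur acc ≠ [] := by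
  induction fuel generalizing l cur acc with
  | zero => simp [PySem.Chars.splitOn.go]
  | succ f ih =>
    cases l with
    | nil => simp [PySem.Chars.splitOn.go]
    | cons c rest =>
      rw [PySem.Chars.splitOn.go]
      split_ifs with h
      · exact ih _ _ _
      · exact ih _ _ _

theorem splitOn_ne_nil (s sep : List Char) : PySem.Chars.splitOn s sep ≠ [] :=
  splitOn_go_ne_nil sep _ s [] []

theorem splitOn_go_last (sep : List Char) (hsep : sep ≠ []) :
    ∀ (fuel : Nat) (l cur : List Char) (acc : List (List Char)),
      l.length ≤ fuel →
      (∀ t, t ≠ [] → t <:+ cur.reverse → ¬ sep.isPrefixOf (t ++ l) = true) →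
      ∀ x, (PySem.Chars.splitOn.go sep fuel l cur acc).getLast? = some x → ¬ sep <:+: x := by
  intro fuel
  induction fuel with
  | zero =>
    intro l cur acc hlen hinv x hx
    have hl : l = [] := List.eq_nil_of_length_eq_zero (Nat.le_zero.mp hlen)
    subst hl
    rw [PySem.Chars.splitOn.go] at hx
    rw [List.getLast?_reverse] at hx
    simp at hx
    subst hx
    intro hinf
    obtain ⟨t, hpre, hsuf⟩ := List.infix_iff_prefix_suffix.mp hinf
    have ht : t ≠ [] := by
      intro h0; subst h0; exact hsep (List.prefix_nil.mp hpre)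
    exact hinv t ht hsuf (by simpa [List.isPrefixOf_iff_prefix] using hpre)
  | succ f ih =>
    intro l cur acc hlen hinv x hx
    cases l with
    | nil =>
      rw [show PySem.Chars.splitOn.go sep (f + 1) [] cur acc
            = (cur.reverse :: acc).reverse from rfl] at hx
      rw [List.getLast?_reverse] at hx
      simp at hx
      subst hx
      intro hinf
      obtain ⟨t, hpre, hsuf⟩ := List.infix_iff_prefix_suffix.mp hinf
      have ht : t ≠ [] := by
        intro h0; subst h0; exact hsep (List.prefix_nil.mp hpre)
      exact hinv t ht hsuf (by simpa [List.isPrefixOf_iff_prefix] using hpre)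
    | cons c rest =>
      rw [show PySem.Chars.splitOn.go sep (f + 1) (c :: rest) cur acc
            = if sep.isPrefixOf (c :: rest) = true then
                PySem.Chars.splitOn.go sep f (List.drop sep.length (c :: rest)) [] (cur.reverse :: acc)
              else PySem.Chars.splitOn.go sep f rest (c :: cur) acc from rfl] at hx
      split_ifs at hx with hpre
      · refine ih _ [] _ ?_ ?_ x hx
        · have hslen : 1 ≤ sep.length := List.length_pos_iff.mpr hsep
          simp at hlen ⊢
          omega
        · intro t ht hsuf
          simp at hsuf
          exact absurd hsuf ht
      · refine ih rest (c :: cur) acc ?_ ?_ x hx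
        · simpa using hlen
        · intro t ht hsuf
          have hsuf' : t.reverse <+: c :: cur := by
            have := List.reverse_prefix.mpr hsuf
            simpa using this
          cases htr : t.reverse with
          | nil => exact absurd (by simpa using congrArg List.reverse htr) ht
          | cons a tr =>
            rw [htr] at hsuf'
            obtain ⟨ha, htr2⟩ := List.cons_prefix_cons.mp hsuf'
            subst ha
            have hteq : t = tr.reverse ++ [a] := by
              have := congrArg List.reverse htr
              simpa using this
            rw [hteq, List.append_assoc]
            simp only [List.singleton_append]
            rcases eq_or_ne tr [] with rfl | htrne
            · simpa using hpre
            · exact hinv tr.reverse (by simpa using htrne)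
                (List.reverse_suffix.mpr htr2) 

theorem splitOn_last_not_infix (s sep : List Char) (hsep : sep ≠ []) :
    ∀ x, (PySem.Chars.splitOn s sep).getLast? = some x → ¬ sep <:+: x := by
  intro x hx
  exact splitOn_go_last sep hsep (s.length + 1) s [] [] (by omega)
    (by intro t ht hsuf; simp at hsuf; exact absurd hsuf ht) x hx

theorem strip_infix (s : List Char) : PySem.Chars.strip s <:+: s := by
  have h1 : PySem.Chars.lstrip s <:+ s := List.dropWhile_suffix _
  have h2 : PySem.Chars.strip s <+: PySem.Chars.lstrip s := by
    unfold PySem.Chars.strip PySem.Chars.rstrip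
    rw [← List.reverse_suffix]
    simpa using List.dropWhile_suffix (l := (PySem.Chars.lstrip s).reverse) (p := PySem.Chars.isspace)
  exact h2.isInfix.trans h1.isInfix

-- s.split(sep)[-1] = the last piece, and it contains no further occurrence of sep
theorem last_piece (s sep : List Char) (hsep : sep ≠ []) :
    ¬ PySem.Chars.isIn sep (PySem.List.pyGetD (PySem.Chars.splitOn s sep) (-1) []) = true := by
  have hne := splitOn_ne_nil s sep
  rw [PySem.List.pyGetD_neg_one _ _ hne, PySem.Chars.isIn_iff_infix]
  exact splitOn_last_not_infix s sep hsep _ (List.getLast?_eq_some_getLast hne)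

theorem core_eq (s : List Char) :
    parse_file_id_go (s.length + 1) s = parse_file_id_alt_core s := by
  rw [parse_file_id_go]
  unfold parse_file_id_alt_core
  by_cases hu : PySem.Chars.isIn pvU (PySem.Chars.strip s) = true
  · simp [hu, List.find?]
  · by_cases hf : PySem.Chars.isIn pvF (PySem.Chars.strip s) = true
    · simp [hu, hf, List.find?]
    · by_cases hh : PySem.Chars.isIn pvH (PySem.Chars.strip s) = true
      · have hs1ne : PySem.Chars.strip s ≠ [] := by
          intro h0
          rw [PySem.Chars.isIn_iff_infix, h0] at hh
          have : pvH = [] := List.eq_nil_of_infix_nil hh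
          exact absurd this (by decide)
        have hsne : s ≠ [] := by
          intro h0; apply hs1ne; rw [h0]; rfl
        obtain ⟨c, s', rfl⟩ := List.exists_cons_of_ne_nil hsne
        have hkey : ¬ PySem.Chars.isIn pvH
            (PySem.Chars.strip (PySem.List.pyGetD
              (PySem.Chars.splitOn (PySem.Chars.strip (c :: s')) pvH) (-1) [])) = true := by
          intro hcon
          apply last_piece (PySem.Chars.strip (c :: s')) pvH (by decide)
          rw [PySem.Chars.isIn_iff_infix] at hcon ⊢
          exact hcon.trans (strip_infix _)
        simp only [hu, hf, hh, if_true, Bool.not_false, Bool.and_true, List.length_cons]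
        rw [parse_file_id_go]
        by_cases hu2 : PySem.Chars.isIn pvU (PySem.Chars.strip (PySem.List.pyGetD
            (PySem.Chars.splitOn (PySem.Chars.strip (c :: s')) pvH) (-1) [])) = true
        · simp [hu2, List.find?]
        · by_cases hf2 : PySem.Chars.isIn pvF (PySem.Chars.strip (PySem.List.pyGetD
              (PySem.Chars.splitOn (PySem.Chars.strip (c :: s')) pvH) (-1) [])) = true
          · simp [hu2, hf2, List.find?]
          · simp [hu2, hf2, hkey, List.find?]
      · simp [hu, hf, hh, List.find?]

theorem parse_file_id_eq (input_str : String) :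
    parse_file_id input_str = parse_file_id_alt input_str := by
  unfold parse_file_id parse_file_id_alt
  rw [core_eq]

-- ===== VERDICT (by name: the statement is the Claim_ definition above) =====
theorem parse_file_id_spec : Claim_equal_parse_file_id := by
  intro input_str _
  unfold Spec_parse_file_id
  exact parse_file_id_eq input_str
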